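-- pv_equiv track=rewrite | github.com/cxMoonGlade/QIP_IGNN | pca_training_dynamics.py | collect_run_feature_keys
-- ===== SOURCE A (Python) =====
-- from typing import Any, Dict, List, Optional, Sequence, Set, Tuple
--
-- DEFAULT_RUN_STAT_KEYS = [
--     "train_loss",
--     "train_acc",
--     "val_loss",
--     "val_acc",
--     "train_val_gap",
--     "time",
--     "global_iter",
--     "global_residual",
--     "global_converged_pct",
--     "global_L_g",
--     "val_rocauc",
-- ]
--
-- DEFAULT_RUN_EXTRA_KEYS = [
--     "global_Q_mean",
--     "global_Q_std",
--     "global_Q_abs_mean",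
--     "global_Q_max_abs",
--     "global_Q_norm",
--     "global_B_mean",
--     "global_B_std",
--     "global_B_abs_mean",
--     "global_B_max_abs",
--     "global_B_norm",
--     "global_B_pre_norm",
--     "global_B_post_norm",
--     "global_WZA_abs_mean",
--     "global_WZA_norm",
--     "global_Q_B_ratio_norm",
--     "global_Q_WZA_ratio_norm",
--     "global_Q_B_ratio_abs",
--     "global_Q_WZA_ratio_abs",
-- ]
--
-- def collect_run_feature_keys(rows: List[Dict[str, Any]]) -> List[str]:
--     stat_suffixes = ("_mean", "_std", "_last")
--     key_set: Set[str] = set()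
--     for row in rows:
--         for key in row.keys():
--             if key.endswith(stat_suffixes):
--                 key_set.add(key)
--     ordered = []
--     preferred = DEFAULT_RUN_STAT_KEYS + DEFAULT_RUN_EXTRA_KEYS
--     for base in preferred:
--         for suffix in stat_suffixes:
--             key = f"{base}{suffix}"
--             if key in key_set:
--                 ordered.append(key)
--                 key_set.remove(key)
--     ordered.extend(sorted(key_set))
--     return ordered
-- ===== SOURCE B (Python) =====
-- from typing import Any, Dict, List
--
-- DEFAULT_RUN_STAT_KEYS = [
--     "train_loss",
--     "train_acc",
--     "val_loss",
--     "val_acc",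
--     "train_val_gap",
--     "time",
--     "global_iter",
--     "global_residual",
--     "global_converged_pct",
--     "global_L_g",
--     "val_rocauc",
-- ]
--
-- DEFAULT_RUN_EXTRA_KEYS = [
--     "global_Q_mean",
--     "global_Q_std",
--     "global_Q_abs_mean",
--     "global_Q_max_abs",
--     "global_Q_norm",
--     "global_B_mean",
--     "global_B_std",
--     "global_B_abs_mean",
--     "global_B_max_abs",
--     "global_B_norm",
--     "global_B_pre_norm",
--     "global_B_post_norm",
--     "global_WZA_abs_mean",
--     "global_WZA_norm",
--     "global_Q_B_ratio_norm",
--     "global_Q_WZA_ratio_norm",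
--     "global_Q_B_ratio_abs",
--     "global_Q_WZA_ratio_abs",
-- ]
--
--
-- def collect_run_feature_keys(rows: List[Dict[str, Any]]) -> List[str]:
--     stat_suffixes = ("_mean", "_std", "_last")
--     preferred_keys = [base + suffix
--                       for base in DEFAULT_RUN_STAT_KEYS + DEFAULT_RUN_EXTRA_KEYS
--                       for suffix in stat_suffixes]
--     rank = {key: n for n, key in enumerate(preferred_keys)}
--     found = {key for row in rows for key in row if key.endswith(stat_suffixes)}
--     return sorted(found, key=lambda k: (rank.get(k, len(rank)), k))
-- ===== Notes on version B (the rewrite author's own statement) =====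
-- stated objective: simpler
-- what changed: A's two-phase control flow (emit preferred base+suffix keys in a fixed order while removing them from the set, then append the sorted leftovers) is replaced by building a rank dict once and returning a single sorted() over the collected key set with the composite key (rank.get(k, len(rank)), k).
import Mathlib
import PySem

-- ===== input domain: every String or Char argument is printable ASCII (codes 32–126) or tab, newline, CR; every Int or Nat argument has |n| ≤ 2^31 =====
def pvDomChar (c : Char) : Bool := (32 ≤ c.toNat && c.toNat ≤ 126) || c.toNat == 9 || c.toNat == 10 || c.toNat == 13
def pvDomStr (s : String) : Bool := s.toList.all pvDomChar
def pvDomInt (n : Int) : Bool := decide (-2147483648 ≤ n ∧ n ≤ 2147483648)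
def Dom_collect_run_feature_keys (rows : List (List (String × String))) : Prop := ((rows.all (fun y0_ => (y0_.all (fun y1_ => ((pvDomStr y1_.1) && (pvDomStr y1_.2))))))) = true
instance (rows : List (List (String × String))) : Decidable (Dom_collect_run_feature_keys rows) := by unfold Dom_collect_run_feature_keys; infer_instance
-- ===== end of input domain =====

-- B replaces A's two-phase "emit preferred keys in order, then sort the leftovers" control flow by one
-- keyed sort over a precomputed rank table (objective: simpler decomposition, same cost).

-- module constants (shared by both Pythons)
def pvStatKeys : List String :=
  ["train_loss", "train_acc", "val_loss", "val_acc", "train_val_gap", "time", "global_iter",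
   "global_residual", "global_converged_pct", "global_L_g", "val_rocauc"]
def pvExtraKeys : List String :=
  ["global_Q_mean", "global_Q_std", "global_Q_abs_mean", "global_Q_max_abs", "global_Q_norm",
   "global_B_mean", "global_B_std", "global_B_abs_mean", "global_B_max_abs", "global_B_norm",
   "global_B_pre_norm", "global_B_post_norm", "global_WZA_abs_mean", "global_WZA_norm",
   "global_Q_B_ratio_norm", "global_Q_WZA_ratio_norm", "global_Q_B_ratio_abs", "global_Q_WZA_ratio_abs"]
def pvSuffixes : List String := ["_mean", "_std", "_last"]
-- key.endswith(("_mean", "_std", "_last")): endswith with a tuple = true iff some suffix matches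
def pvIsStat (k : String) : Bool :=
  PySem.Str.endswith k "_mean" || PySem.Str.endswith k "_std" || PySem.Str.endswith k "_last"

-- ===== PORT A =====
-- `for key in row.keys()`: iterates the assoc-list's key column; Set.add ignores duplicates, so the
-- resulting set is exact.  `key_set.remove(key)` runs only under the `key in key_set` guard, where it
-- equals Set.discard (exact here).
def collect_run_feature_keys (rows : List (List (String × String))) : List String :=
  let keySet : PySem.Set String :=
    rows.foldl (fun s row =>
      row.foldl (fun s p => if pvIsStat p.1 then PySem.Set.add s p.1 else s) s) PySem.Set.empty
  let st :=
    (pvStatKeys ++ pvExtraKeys).foldl (fun st base =>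
      pvSuffixes.foldl (fun (st : List String × PySem.Set String) suffix =>
        let key := base ++ suffix
        if PySem.Set.contains st.2 key then (st.1 ++ [key], PySem.Set.discard st.2 key) else st) st)
      ([], keySet)
  st.1 ++ PySem.List.sorted st.2 (fun x => x)

-- ===== PORT B =====
-- preferred_keys = [base + suffix for base in STAT+EXTRA for suffix in stat_suffixes]
def pvPreferredKeys : List String :=
  (pvStatKeys ++ pvExtraKeys).flatMap (fun base => pvSuffixes.map (fun suffix => base ++ suffix))
-- rank = {key: n for n, key in enumerate(preferred_keys)}
def pvRank : PySem.Dict String Int :=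
  PySem.Dict.ofList ((PySem.List.enumerate pvPreferredKeys).map (fun p => (p.2, p.1)))

-- found = {key for row in rows for key in row if key.endswith(stat_suffixes)} = set of the generated key
-- stream; sorted(found, key=lambda k: (rank.get(k, len(rank)), k)) — a tuple key, hence sorted2; the key
-- is injective on the set (its second component is the element), so the sort is order-independent.
def collect_run_feature_keys_alt (rows : List (List (String × String))) : List String :=
  let found : PySem.Set String :=
    PySem.Set.ofList (rows.flatMap (fun row => (row.map Prod.fst).filter pvIsStat))
  PySem.List.sorted2 found (fun k => PySem.Dict.getD pvRank k (pvRank.size : Int)) (fun k => k)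

-- ===== PRECONDITION & SPEC =====
def Spec_collect_run_feature_keys (rows : List (List (String × String))) (out : List String) : Prop := out = collect_run_feature_keys_alt rows
instance (rows : List (List (String × String))) (out : List String) : Decidable (Spec_collect_run_feature_keys rows out) := by unfold Spec_collect_run_feature_keys; infer_instance

-- ===== CLAIM (what is proved, stated in full; the proofs are below) =====
def Claim_equal_collect_run_feature_keys : Prop := ∀ (rows : List (List (String × String))), Dom_collect_run_feature_keys rows → Spec_collect_run_feature_keys rows (collect_run_feature_keys rows)

-- ===== LEMMAS AND PROOFS =====

-- generic: sorted2 equals any strictly-lex-increasing rearrangement of its input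
theorem pv_sorted2_eq {α κ₁ κ₂ : Type} [LinearOrder κ₁] [LinearOrder κ₂]
    (xs ys : List α) (k1 : α → κ₁) (k2 : α → κ₂)
    (hp : ys.Perm xs)
    (hpw : ys.Pairwise (fun a b => k1 a < k1 b ∨ (k1 a = k1 b ∧ k2 a < k2 b))) :
    PySem.List.sorted2 xs k1 k2 = ys := by
  have hb : (fun (a b : α) => decide (k1 a < k1 b) || (!decide (k1 b < k1 a) && decide (k2 a < k2 b)))
      = (fun a b => decide ((toLex (k1 a, k2 a) : Lex (κ₁ × κ₂)) < toLex (k1 b, k2 b))) := by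
    funext a b
    by_cases hab : k1 a < k1 b
    · simp [hab, Prod.Lex.lt_iff, ofLex_toLex, not_lt_of_gt hab]
    · by_cases hba : k1 b < k1 a
      · simp [hab, hba, Prod.Lex.lt_iff, ofLex_toLex, ne_of_gt hba]
      · have heq : k1 a = k1 b := le_antisymm (not_lt.mp hba) (not_lt.mp hab)
        simp [heq, Prod.Lex.lt_iff, ofLex_toLex]
  have h1 : PySem.List.sorted2 xs k1 k2
      = PySem.List.sorted xs (fun x => (toLex (k1 x, k2 x) : Lex (κ₁ × κ₂))) := by
    rw [PySem.List.sorted_eq_foldl_insertBy]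
    unfold PySem.List.sorted2
    rw [hb]; rfl
  rw [h1]
  apply PySem.List.sorted_eq_of_perm_of_pairwise_lt _ _ _ hp
  exact hpw.imp (fun h => by simpa [Prod.Lex.lt_iff, ofLex_toLex] using h)

-- A's set-building loop equals B's set comprehension
theorem pv_inner (row : List (String × String)) :
    ∀ s : PySem.Set String,
      row.foldl (fun s p => if pvIsStat p.1 then PySem.Set.add s p.1 else s) s
      = PySem.Set.update s ((row.map Prod.fst).filter pvIsStat) := by
  induction row with
  | nil => intro s; simp [PySem.Set.update]
  | cons p row ih =>
    intro s
    by_cases h : pvIsStat p.1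
    · simp [h, PySem.Set.update_cons, ih]
    · simp [h, ih]

theorem pv_foldl_update {β : Type} (g : β → List String) (rows : List β) :
    ∀ s : PySem.Set String,
      rows.foldl (fun s row => PySem.Set.update s (g row)) s
      = PySem.Set.update s (rows.flatMap g) := by
  induction rows with
  | nil => intro s; simp [PySem.Set.update]
  | cons row rows ih =>
    intro s
    simp only [List.foldl_cons, List.flatMap_cons, PySem.Set.update_append, ih]

theorem pv_set_eq (rows : List (List (String × String))) :
    rows.foldl (fun s row =>
      row.foldl (fun s p => if pvIsStat p.1 then PySem.Set.add s p.1 else s) s) PySem.Set.empty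
    = PySem.Set.ofList (rows.flatMap (fun row => (row.map Prod.fst).filter pvIsStat)) := by
  simp only [pv_inner]
  rw [pv_foldl_update]
  exact PySem.Set.update_nil_left _

-- A's preferred loop, flattened to a single fold over pvPreferredKeys
def pvStep (st : List String × PySem.Set String) (key : String) : List String × PySem.Set String :=
  if PySem.Set.contains st.2 key then (st.1 ++ [key], PySem.Set.discard st.2 key) else st

theorem pv_loop_flat (s : PySem.Set String) :
    (pvStatKeys ++ pvExtraKeys).foldl (fun st base =>
      pvSuffixes.foldl (fun (st : List String × PySem.Set String) suffix =>
        let key := base ++ suffix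
        if PySem.Set.contains st.2 key then (st.1 ++ [key], PySem.Set.discard st.2 key) else st) st)
      ([], s) = pvPreferredKeys.foldl pvStep ([], s) := by
  rw [pvPreferredKeys, List.foldl_flatMap]
  simp only [List.foldl_map]
  rfl

theorem pv_loop_fst (pl : List String) (hpl : pl.Nodup) :
    ∀ (acc : List String) (s : PySem.Set String),
      (pl.foldl pvStep (acc, s)).1 = acc ++ pl.filter (fun k => PySem.Set.contains s k) := by
  induction pl with
  | nil => intro acc s; simp
  | cons k pl ih =>
    intro acc s
    have hk_not : k ∉ pl := (List.nodup_cons.mp hpl).1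
    have hpl' : pl.Nodup := (List.nodup_cons.mp hpl).2
    by_cases hk : k ∈ s
    · have hc : PySem.Set.contains s k = true := (PySem.Set.contains_iff s k).mpr hk
      simp only [List.foldl_cons, pvStep, hc, if_true, ih hpl']
      rw [List.filter_cons_of_pos (by simpa using hc)]
      have heq : pl.filter (fun x => PySem.Set.contains (PySem.Set.discard s k) x)
           = pl.filter (fun x => PySem.Set.contains s x) := by
        apply List.filter_congr
        intro x hx
        have hxk : x ≠ k := fun h => hk_not (h ▸ hx)
        have h1 : (PySem.Set.discard s k).contains x = true ↔ s.contains x = true := by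
          rw [PySem.Set.contains_iff, PySem.Set.contains_iff, PySem.Set.mem_discard]
          exact ⟨fun h => h.1, fun h => ⟨h, hxk⟩⟩
        exact Bool.coe_iff_coe.mp (by simpa using h1)
      rw [heq]; simp
    · have hc : PySem.Set.contains s k = false := by
        by_contra h
        exact hk ((PySem.Set.contains_iff s k).mp (by simpa using h))
      simp only [List.foldl_cons, pvStep, hc, Bool.false_eq_true, if_false, ih hpl']
      rw [List.filter_cons_of_neg (by rw [PySem.Set.contains_iff]; exact hk)]

theorem pv_loop_snd (pl : List String) :
    ∀ (acc : List String) (s : PySem.Set String),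
      (pl.foldl pvStep (acc, s)).2 = s.filter (fun y => !(pl.contains y)) := by
  induction pl with
  | nil => intro acc s; simp
  | cons k pl ih =>
    intro acc s
    by_cases hk : k ∈ s
    · have hc : PySem.Set.contains s k = true := (PySem.Set.contains_iff s k).mpr hk
      simp only [List.foldl_cons, pvStep, hc, if_true, ih]
      rw [PySem.Set.discard, List.filter_filter]
      apply List.filter_congr
      intro y hy
      by_cases hyk : y = k <;> simp [hyk]
    · have hc : PySem.Set.contains s k = false := by
        by_contra h
        exact hk ((PySem.Set.contains_iff s k).mp (by simpa using h))
      simp only [List.foldl_cons, pvStep, hc, Bool.false_eq_true, if_false, ih]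
      apply List.filter_congr
      intro y hy
      have hyk : y ≠ k := fun h => hk (h ▸ hy)
      simp [hyk]

-- facts about the rank table
set_option maxHeartbeats 1000000 in
set_option maxRecDepth 4000 in
theorem pv_nodup : pvPreferredKeys.Nodup := by decide

theorem pv_len : pvPreferredKeys.length = 87 := by rfl

theorem pv_items : pvRank.items
    = (PySem.List.enumerate pvPreferredKeys).map (fun p => (p.2, p.1)) := by
  show (PySem.Dict.ofList _).items = _
  rw [PySem.Dict.ofList, PySem.Dict.update]
  have h := PySem.Dict.items_foldl_insert_fresh
    ((PySem.List.enumerate pvPreferredKeys).map (fun p => (p.2, p.1)))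
    Prod.fst Prod.snd PySem.Dict.empty
    (fun a _ => by simp [PySem.Dict.contains_empty])
    (by
      have h2 : ((PySem.List.enumerate pvPreferredKeys).map (fun p => (p.2, p.1))).map Prod.fst
          = pvPreferredKeys := by
        rw [List.map_map]
        exact PySem.List.map_snd_enumerate pvPreferredKeys 0
      rw [h2]; exact pv_nodup)
  simpa using h

theorem pv_keys : pvRank.keys = pvPreferredKeys := by
  show pvRank.items.map (fun x => x.1) = _
  rw [pv_items, List.map_map]
  exact PySem.List.map_snd_enumerate pvPreferredKeys 0

theorem pv_size : (pvRank.size : Int) = 87 := by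
  show ((pvRank.items.length : Nat) : Int) = 87
  rw [pv_items]
  simp [PySem.List.length_enumerate, pv_len]

theorem pv_getD_at (i : Nat) (h : i < pvPreferredKeys.length) (d : Int) :
    PySem.Dict.getD pvRank pvPreferredKeys[i] d = (i : Int) := by
  apply PySem.Dict.getD_of_mem_items
  · rw [pv_items]
    apply List.mem_map.mpr
    refine ⟨((i : Int), pvPreferredKeys[i]), ?_, rfl⟩
    rw [PySem.List.mem_enumerate_iff]
    exact ⟨i, h, by simp⟩
  · rw [pv_keys]; exact pv_nodup

theorem pv_getD_out (k : String) (hk : k ∉ pvPreferredKeys) (d : Int) :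
    PySem.Dict.getD pvRank k d = d := by
  apply PySem.Dict.getD_of_not_contains
  by_contra h
  have h2 : pvRank.contains k = true := by simpa using h
  exact hk (pv_keys ▸ (PySem.Dict.contains_iff_mem_keys pvRank k).mp h2)

-- derived key-function facts
theorem pv_k1_pairwise :
    pvPreferredKeys.Pairwise
      (fun a b => PySem.Dict.getD pvRank a (pvRank.size : Int)
                < PySem.Dict.getD pvRank b (pvRank.size : Int)) := by
  rw [List.pairwise_iff_getElem]
  intro i j hi hj hij
  rw [pv_getD_at i hi, pv_getD_at j hj]
  exact_mod_cast hij

theorem pv_k1_lt (a : String) (ha : a ∈ pvPreferredKeys) :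
    PySem.Dict.getD pvRank a (pvRank.size : Int) < 87 := by
  obtain ⟨i, hi, rfl⟩ := List.mem_iff_getElem.mp ha
  rw [pv_getD_at i hi]
  exact_mod_cast pv_len ▸ hi

theorem pv_k1_out (k : String) (hk : k ∉ pvPreferredKeys) :
    PySem.Dict.getD pvRank k (pvRank.size : Int) = 87 := by
  rw [pv_getD_out k hk, pv_size]

-- the heart: B's single keyed sort equals A's "preferred then sorted leftovers" list
theorem pv_main (S : PySem.Set String) (hS : S.Nodup) :
    PySem.List.sorted2 S (fun k => PySem.Dict.getD pvRank k (pvRank.size : Int)) (fun k => k)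
    = pvPreferredKeys.filter (fun k => PySem.Set.contains S k)
      ++ PySem.List.sorted (S.filter (fun y => !(pvPreferredKeys.contains y))) (fun x => x) := by
  set k1 : String → Int := fun k => PySem.Dict.getD pvRank k (pvRank.size : Int) with hk1
  set P := pvPreferredKeys.filter (fun k => PySem.Set.contains S k) with hP
  set L := PySem.List.sorted (S.filter (fun y => !(pvPreferredKeys.contains y))) (fun x => x) with hL
  have hPmem : ∀ x, x ∈ P ↔ x ∈ pvPreferredKeys ∧ x ∈ S := by
    intro x
    rw [hP, List.mem_filter, PySem.Set.contains_iff]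
  have hLmem : ∀ x ∈ L, x ∈ S ∧ x ∉ pvPreferredKeys := by
    intro x hx
    rw [hL, PySem.List.mem_sorted, List.mem_filter] at hx
    exact ⟨hx.1, by simpa using hx.2⟩
  apply pv_sorted2_eq
  · -- permutation
    have hP2 : P.Perm (S.filter (fun y => pvPreferredKeys.contains y)) := by
      rw [List.perm_ext_iff_of_nodup (hP ▸ pv_nodup.filter _) (hS.filter _)]
      intro a
      rw [hPmem, List.mem_filter]
      constructor
      · rintro ⟨h1, h2⟩; exact ⟨h2, by simpa using h1⟩
      · rintro ⟨h1, h2⟩; exact ⟨by simpa using h2, h1⟩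
    have hL2 : L.Perm (S.filter (fun y => !(pvPreferredKeys.contains y))) :=
      PySem.List.sorted_perm _ _ _
    exact (hP2.append hL2).trans (List.filter_append_perm _ S)
  · -- pairwise strict lex order on P ++ L
    rw [List.pairwise_append]
    refine ⟨?_, ?_, ?_⟩
    · exact (pv_k1_pairwise.filter _).imp (fun h => Or.inl h)
    · have hle : L.Pairwise (fun a b => a ≤ b) := PySem.List.sorted_pairwise _ _
      have hnd : L.Nodup :=
        (PySem.List.sorted_perm _ _ _).nodup_iff.mpr (hS.filter _)
      have hlt : L.Pairwise (fun a b => a < b) :=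
        (hle.and hnd).imp (fun h => lt_of_le_of_ne h.1 h.2)
      apply hlt.imp_of_mem
      intro a b ha hb h
      refine Or.inr ⟨?_, h⟩
      show k1 a = k1 b
      rw [hk1]
      simp only []
      rw [pv_k1_out a (hLmem a ha).2, pv_k1_out b (hLmem b hb).2]
    · intro a ha b hb
      refine Or.inl ?_
      show k1 a < k1 b
      rw [hk1]
      simp only []
      rw [pv_k1_out b (hLmem b hb).2]
      exact pv_k1_lt a ((hPmem a).mp ha).1

-- ===== VERDICT (by name: the statement is the Claim_ definition above) =====
theorem collect_run_feature_keys_spec : Claim_equal_collect_run_feature_keys := by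
  intro rows _
  unfold Spec_collect_run_feature_keys
  simp only [collect_run_feature_keys, collect_run_feature_keys_alt]
  rw [pv_set_eq, pv_loop_flat, pv_loop_fst pvPreferredKeys pv_nodup, pv_loop_snd]
  rw [pv_main _ (PySem.Set.nodup_ofList _)]
  simp
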